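-- pv_equiv track=rewrite | github.com/tejakummarikuntla/imaginea_assign | 01/04_Matrix_Rotation/rot_mat.py | rot_mat
-- ===== SOURCE A (Python) =====
-- def rot_mat(mat):
--     if not len(mat):
--         return
--
--     tp = 0
--     btm = len(mat)-1
--
--     left = 0
--     right = len(mat[0])-1
--
--     while left < right and tp < btm:
--         prev = mat[tp+1][left]
--         for i in range(left, right+1):
--             curr = mat[tp][i]
--             mat[tp][i] = prev
--             prev = curr
--
--         tp += 1
--         for i in range(tp, btm+1):
--             curr = mat[i][right]
--             mat[i][right] = prev
--             prev = curr
--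
--         right -= 1
--         for i in range(right, left-1, -1):
--             curr = mat[btm][i]
--             mat[btm][i] = prev
--             prev = curr
--
--         btm -= 1
--         for i in range(btm, tp-1, -1):
--             curr = mat[i][left]
--             mat[i][left] = prev
--             prev = curr
--
--         left += 1
--
--     return mat
-- ===== SOURCE B (Python) =====
-- def rot_mat(mat):
--     if not len(mat):
--         return
--
--     tp, btm = 0, len(mat) - 1
--     left, right = 0, len(mat[0]) - 1
--
--     while left < right and tp < btm:
--         coords = [(tp, i) for i in range(left, right + 1)]
--         coords += [(i, right) for i in range(tp + 1, btm + 1)]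
--         coords += [(btm, i) for i in range(right - 1, left - 1, -1)]
--         coords += [(i, left) for i in range(btm - 1, tp, -1)]
--         vals = [mat[r][c] for r, c in coords]
--         vals = vals[-1:] + vals[:-1]
--         for (r, c), v in zip(coords, vals):
--             mat[r][c] = v
--         tp += 1
--         btm -= 1
--         left += 1
--         right -= 1
--     return mat
-- ===== Notes on version B (the rewrite author's own statement) =====
-- stated objective: alternative
-- what changed: Each ring rotation is re-decomposed: instead of threading a 'prev' value through four separate in-place shift loops (top row, right column, bottom row, left column), B builds the explicit clockwise perimeter coordinate list of the ring, reads all its values, rotates that value list by one (last to front) and writes it back in a single pass.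
import Mathlib
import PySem

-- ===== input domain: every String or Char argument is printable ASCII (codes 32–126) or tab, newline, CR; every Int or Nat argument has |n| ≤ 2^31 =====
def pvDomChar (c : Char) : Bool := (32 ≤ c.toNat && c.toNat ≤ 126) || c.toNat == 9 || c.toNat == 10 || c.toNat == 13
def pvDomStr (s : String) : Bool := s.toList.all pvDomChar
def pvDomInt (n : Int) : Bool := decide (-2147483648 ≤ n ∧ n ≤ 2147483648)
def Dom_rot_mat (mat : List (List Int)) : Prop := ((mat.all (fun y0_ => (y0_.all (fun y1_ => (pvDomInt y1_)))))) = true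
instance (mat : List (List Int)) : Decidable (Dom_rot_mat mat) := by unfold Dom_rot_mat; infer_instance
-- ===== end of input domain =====

-- B rewrites each ring rotation as: build the clockwise perimeter coordinate list, read the values,
-- rotate them by one (last to front) and write them back — instead of A's prev-threading through four
-- separate shift loops (objective: alternative decomposition; return-value equivalence; both Pythons
-- mutate their argument in place in the same way).


-- ===== PORT A =====
-- mat[r][c] as a total read (inside Pre_ every index used is in range, so the default is never hit)
def getM (m : List (List Int)) (r c : Int) : Int :=
  PySem.List.pyGetD (PySem.List.pyGetD m r []) c 0

-- mat[r][c] = v (inside Pre_ every index used is in range)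
def setM (m : List (List Int)) (r c : Int) (v : Int) : List (List Int) :=
  PySem.List.pySetD m r (PySem.List.pySetD (PySem.List.pyGetD m r []) c v)

-- the while loop of A: four prev-threading shift loops, then the bounds move inward
def rotLoopA (fuel : Nat) (m : List (List Int)) (tp btm left right : Int) : List (List Int) :=
  match fuel with
  | 0 => m
  | fuel + 1 =>
    if left < right ∧ tp < btm then
      let s1 := (PySem.List.pyRange left (right+1) 1).foldl
        (fun s i => (setM s.1 tp i s.2, getM s.1 tp i)) (m, getM m (tp+1) left)
      let s2 := (PySem.List.pyRange (tp+1) (btm+1) 1).foldl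
        (fun s i => (setM s.1 i right s.2, getM s.1 i right)) s1
      let s3 := (PySem.List.pyRange (right-1) (left-1) (-1)).foldl
        (fun s i => (setM s.1 btm i s.2, getM s.1 btm i)) s2
      let s4 := (PySem.List.pyRange (btm-1) ((tp+1)-1) (-1)).foldl
        (fun s i => (setM s.1 i left s.2, getM s.1 i left)) s3
      rotLoopA fuel s4.1 (tp+1) (btm-1) (left+1) (right-1)
    else m

-- fuel = (right + btm).toNat bounds the iteration count: the while-condition needs
-- right - left > 0 and btm - tp > 0 and each pass shrinks (right-left)+(btm-tp) by 4
def rot_mat (mat : List (List Int)) : Option (List (List Int)) :=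
  if PySem.List.len mat = 0 then none
  else
    let btm := PySem.List.len mat - 1
    let right := PySem.List.len (PySem.List.pyGetD mat 0 []) - 1
    some (rotLoopA (right + btm).toNat mat 0 btm 0 right)

-- ===== PORT B =====
-- the clockwise perimeter coordinates of one ring
def ringCoords (tp btm left right : Int) : List (Int × Int) :=
  ((PySem.List.pyRange left (right+1) 1).map (fun i => (tp, i)))
  ++ ((PySem.List.pyRange (tp+1) (btm+1) 1).map (fun i => (i, right)))
  ++ ((PySem.List.pyRange (right-1) (left-1) (-1)).map (fun i => (btm, i)))
  ++ ((PySem.List.pyRange (btm-1) tp (-1)).map (fun i => (i, left)))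

-- the while loop of B: read the ring's values, rotate by one, write back
def rotLoopB (fuel : Nat) (m : List (List Int)) (tp btm left right : Int) : List (List Int) :=
  match fuel with
  | 0 => m
  | fuel + 1 =>
    if left < right ∧ tp < btm then
      let coords := ringCoords tp btm left right
      let vals := coords.map (fun rc => getM m rc.1 rc.2)
      let vals' := PySem.List.slice vals (some (-1)) none ++ PySem.List.slice vals none (some (-1))
      let m' := (coords.zip vals').foldl (fun acc cv => setM acc cv.1.1 cv.1.2 cv.2) m
      rotLoopB fuel m' (tp+1) (btm-1) (left+1) (right-1)
    else m

def rot_mat_alt (mat : List (List Int)) : Option (List (List Int)) :=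
  if PySem.List.len mat = 0 then none
  else
    let btm := PySem.List.len mat - 1
    let right := PySem.List.len (PySem.List.pyGetD mat 0 []) - 1
    some (rotLoopB (right + btm).toNat mat 0 btm 0 right)

-- ===== PRECONDITION & SPEC =====
-- Exactly the inputs on which A returns: on ring k the loop indexes columns up to len(mat[0])-1-k in
-- every row k..len(mat)-1-k, so a row shorter than that makes A raise IndexError; nothing else raises.
def Pre_rot_mat (mat : List (List Int)) : Prop :=
  ∀ k < mat.length, ∀ i < mat.length,
    (2*k+1 < (mat.headD []).length ∧ 2*k+1 < mat.length ∧ k ≤ i ∧ i < mat.length - k) →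
    (mat.headD []).length - k ≤ (mat.getD i []).length
instance (mat : List (List Int)) : Decidable (Pre_rot_mat mat) := by unfold Pre_rot_mat; infer_instance
def pvWitness_rot_mat : List (List Int) := [[1, 2], [3, 4]]

def Spec_rot_mat (mat : List (List Int)) (out : Option (List (List Int))) : Prop := out = rot_mat_alt mat
instance (mat : List (List Int)) (out : Option (List (List Int))) : Decidable (Spec_rot_mat mat out) := by unfold Spec_rot_mat; infer_instance

-- ===== CLAIM (what is proved, stated in full; the proofs are below) =====
def Claim_equal_rot_mat : Prop := ∀ (mat : List (List Int)), Dom_rot_mat mat → Pre_rot_mat mat → Spec_rot_mat mat (rot_mat mat)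

-- ===== LEMMAS AND PROOFS =====

-- one combined step of A's prev-threading shift
def shiftStep (s : List (List Int) × Int) (rc : Int × Int) : List (List Int) × Int :=
  (setM s.1 rc.1 rc.2 s.2, getM s.1 rc.1 rc.2)

-- B's write-back fold, named for the proofs
def writeL (m : List (List Int)) (l : List ((Int × Int) × Int)) : List (List Int) :=
  l.foldl (fun acc cv => setM acc cv.1.1 cv.1.2 cv.2) m

theorem mem_pyRange_neg_one {x a b : Int} :
    x ∈ PySem.List.pyRange a b (-1) ↔ b < x ∧ x ≤ a := by
  rw [PySem.List.pyRange_neg_one]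
  simp only [List.mem_map, List.mem_range]
  constructor
  · rintro ⟨k, hk, rfl⟩; omega
  · rintro ⟨h1, h2⟩; exact ⟨(a - x).toNat, by omega, by omega⟩

theorem nodup_pyRange_neg_one (a b : Int) : (PySem.List.pyRange a b (-1)).Nodup := by
  rw [PySem.List.pyRange_neg_one]
  exact List.nodup_range.map (fun k k' h => by omega)

theorem pyRange_neg_one_concat {a b : Int} (h : b < a) :
    PySem.List.pyRange a b (-1) = PySem.List.pyRange a (b+1) (-1) ++ [b+1] := by
  rw [PySem.List.pyRange_neg_one, PySem.List.pyRange_neg_one]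
  have hn : (a - b).toNat = (a - (b+1)).toNat + 1 := by omega
  rw [hn, List.range_succ, List.map_append]
  congr 1
  simp
  omega

theorem getM_setM_ne {m : List (List Int)} {r c r' c' : Int} {v : Int}
    (hr : 0 ≤ r) (hc : 0 ≤ c) (hr' : 0 ≤ r') (hc' : 0 ≤ c')
    (hne : (r, c) ≠ (r', c')) :
    getM (setM m r c v) r' c' = getM m r' c' := by
  unfold getM setM
  rw [PySem.List.pySetD_of_nonneg _ _ hr, PySem.List.pySetD_of_nonneg _ _ hc]
  rw [PySem.List.pyGetD_of_nonneg _ _ hr]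
  repeat rw [PySem.List.pyGetD_of_nonneg _ _ hr']
  repeat rw [PySem.List.pyGetD_of_nonneg _ _ hc']
  simp only [List.getD_eq_getElem?_getD, List.getElem?_set]
  by_cases hrr : r.toNat = r'.toNat
  · have hr2 : r = r' := by omega
    subst hr2
    have hcc : c.toNat ≠ c'.toNat := by intro h; apply hne; simp; omega
    by_cases hlt : r.toNat < m.length
    · simp only [hlt, if_true, Option.getD_some]
      simp [hcc]
    · simp [hlt]
  · simp [hrr]

theorem shift_eq (coords : List (Int × Int)) :
    ∀ (m : List (List Int)) (p : Int), coords.Nodup →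
    (∀ rc ∈ coords, 0 ≤ rc.1 ∧ 0 ≤ rc.2) →
    (coords.foldl shiftStep (m, p)).1
      = writeL m (coords.zip (p :: coords.dropLast.map (fun rc => getM m rc.1 rc.2))) := by
  induction coords with
  | nil => intro m p _ _; simp [writeL]
  | cons c cs ih =>
    intro m p hnd hpos
    have hc : 0 ≤ c.1 ∧ 0 ≤ c.2 := hpos c (by simp)
    have hnotin : c ∉ cs := (List.nodup_cons.mp hnd).1
    cases cs with
    | nil => simp [writeL, shiftStep]
    | cons d ds =>
      have hstep : (c :: d :: ds).foldl shiftStep (m, p)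
          = (d :: ds).foldl shiftStep (setM m c.1 c.2 p, getM m c.1 c.2) := by
        simp [shiftStep]
      rw [hstep, ih (setM m c.1 c.2 p) (getM m c.1 c.2) (List.nodup_cons.mp hnd).2
            (fun rc h => hpos rc (by simp [h]))]
      have hmap : (d :: ds).dropLast.map
            (fun rc => getM (setM m c.1 c.2 p) rc.1 rc.2)
          = (d :: ds).dropLast.map (fun rc => getM m rc.1 rc.2) := by
        apply List.map_congr_left
        intro rc hrc
        have hmem : rc ∈ d :: ds := List.dropLast_subset _ hrc
        have hrcpos := hpos rc (by simp [List.mem_cons] at hmem ⊢; tauto)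
        exact getM_setM_ne hc.1 hc.2 hrcpos.1 hrcpos.2
          (by intro h; exact hnotin (by rw [Prod.ext_iff] at h; cases rc; cases c; simp_all))
      rw [hmap]
      have : (c :: d :: ds).dropLast = c :: (d :: ds).dropLast := by simp
      rw [this]
      simp [writeL, List.zip_cons_cons]

theorem ringCoords_concat {tp btm left right : Int} (h1 : left < right) (h2 : tp < btm) :
    ∃ front, ringCoords tp btm left right = front ++ [(tp + 1, left)] := by
  unfold ringCoords
  by_cases hb : tp + 1 < btm
  · refine ⟨((PySem.List.pyRange left (right+1) 1).map (fun i => ((tp:Int), i)))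
      ++ ((PySem.List.pyRange (tp+1) (btm+1) 1).map (fun i => (i, right)))
      ++ ((PySem.List.pyRange (right-1) (left-1) (-1)).map (fun i => (btm, i)))
      ++ ((PySem.List.pyRange (btm-1) (tp+1) (-1)).map (fun i => (i, left))), ?_⟩
    rw [pyRange_neg_one_concat (by omega : tp < btm - 1)]
    simp [List.append_assoc]
  · have hb2 : btm = tp + 1 := by omega
    have h4 : PySem.List.pyRange (btm-1) tp (-1) = [] := by
      rw [PySem.List.pyRange_neg_one]
      have : (btm - 1 - tp).toNat = 0 := by omega
      simp [this]
    refine ⟨((PySem.List.pyRange left (right+1) 1).map (fun i => ((tp:Int), i)))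
      ++ ((PySem.List.pyRange (tp+1) (btm+1) 1).map (fun i => (i, right)))
      ++ ((PySem.List.pyRange (right-1) left (-1)).map (fun i => (btm, i))), ?_⟩
    rw [h4, pyRange_neg_one_concat (by omega : left - 1 < right - 1)]
    simp [List.append_assoc, hb2]

theorem ringCoords_nodup {tp btm left right : Int} (h1 : left < right) (h2 : tp < btm) :
    (ringCoords tp btm left right).Nodup := by
  unfold ringCoords
  simp only [List.nodup_append]
  refine ⟨⟨⟨?_, ?_, ?_⟩, ?_, ?_⟩, ?_, ?_⟩
  · exact List.Nodup.map (fun a b h => by simpa using h) (PySem.List.nodup_pyRange_one _ _)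
  · exact List.Nodup.map (fun a b h => by simpa using h) (PySem.List.nodup_pyRange_one _ _)
  · intro x hx y hy
    simp only [List.mem_map, PySem.List.mem_pyRange_one] at hx hy
    obtain ⟨i, hi, rfl⟩ := hx
    obtain ⟨j, hj, rfl⟩ := hy
    simp only [Ne, Prod.mk.injEq, not_and]
    intro e1 e2
    omega
  · exact List.Nodup.map (fun a b h => by simpa using h) (nodup_pyRange_neg_one _ _)
  · intro x hx y hy
    simp only [List.mem_append, List.mem_map, PySem.List.mem_pyRange_one,
      mem_pyRange_neg_one] at hx hy
    obtain ⟨j, hj, rfl⟩ := hy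
    rcases hx with ⟨i, hi, rfl⟩ | ⟨i, hi, rfl⟩ <;>
      (simp only [Ne, Prod.mk.injEq, not_and]; intro e1 e2; omega)
  · exact List.Nodup.map (fun a b h => by simpa using h) (nodup_pyRange_neg_one _ _)
  · intro x hx y hy
    simp only [List.mem_append, List.mem_map, PySem.List.mem_pyRange_one,
      mem_pyRange_neg_one] at hx hy
    obtain ⟨j, hj, rfl⟩ := hy
    rcases hx with (⟨i, hi, rfl⟩ | ⟨i, hi, rfl⟩) | ⟨i, hi, rfl⟩ <;>
      (simp only [Ne, Prod.mk.injEq, not_and]; intro e1 e2; omega)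

theorem ringCoords_nonneg {tp btm left right : Int} (htp : 0 ≤ tp) (hleft : 0 ≤ left)
    (h1 : left < right) (h2 : tp < btm) :
    ∀ rc ∈ ringCoords tp btm left right, 0 ≤ rc.1 ∧ 0 ≤ rc.2 := by
  intro rc hrc
  simp only [ringCoords, List.mem_append, List.mem_map, PySem.List.mem_pyRange_one,
    mem_pyRange_neg_one] at hrc
  rcases hrc with ((⟨i,hi,rfl⟩|⟨i,hi,rfl⟩)|⟨i,hi,rfl⟩)|⟨i,hi,rfl⟩ <;>
    refine ⟨by dsimp only; omega, by dsimp only; omega⟩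

theorem step_eq (m : List (List Int)) {tp btm left right : Int}
    (htp : 0 ≤ tp) (hleft : 0 ≤ left) (h1 : left < right) (h2 : tp < btm) :
    ((ringCoords tp btm left right).foldl shiftStep (m, getM m (tp+1) left)).1
      = writeL m ((ringCoords tp btm left right).zip
          (PySem.List.slice ((ringCoords tp btm left right).map (fun rc => getM m rc.1 rc.2)) (some (-1)) none
           ++ PySem.List.slice ((ringCoords tp btm left right).map (fun rc => getM m rc.1 rc.2)) none (some (-1)))) := by
  obtain ⟨front, hf⟩ := ringCoords_concat h1 h2
  rw [shift_eq _ m _ (ringCoords_nodup h1 h2) (ringCoords_nonneg htp hleft h1 h2)]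
  rw [hf]
  rw [PySem.List.slice_from_neg_one, PySem.List.slice_to_neg_one]
  rw [List.map_append]
  simp only [List.map_singleton]
  rw [List.dropLast_concat]
  have hdrop : (front.map (fun rc => getM m rc.1 rc.2)
        ++ [getM m (tp+1) left]).drop ((front.map (fun rc => getM m rc.1 rc.2)
        ++ [getM m (tp+1) left]).length - 1) = [getM m (tp+1) left] := by
    rw [List.length_append, List.length_map, List.length_singleton]
    have : front.length + 1 - 1 = (front.map (fun rc => getM m rc.1 rc.2)).length := by
      simp
    rw [this, List.drop_left]
  rw [hdrop, List.dropLast_concat]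
  rfl

theorem foldA_eq (m : List (List Int)) (tp btm left right p0 : Int) :
    (List.foldl (fun s i => (setM s.1 i left s.2, getM s.1 i left))
      (List.foldl (fun s i => (setM s.1 btm i s.2, getM s.1 btm i))
        (List.foldl (fun s i => (setM s.1 i right s.2, getM s.1 i right))
          (List.foldl (fun s i => (setM s.1 tp i s.2, getM s.1 tp i)) (m, p0)
            (PySem.List.pyRange left (right+1) 1))
          (PySem.List.pyRange (tp+1) (btm+1) 1))
        (PySem.List.pyRange (right-1) (left-1) (-1)))
      (PySem.List.pyRange (btm-1) ((tp+1)-1) (-1)))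
    = List.foldl shiftStep (m, p0) (ringCoords tp btm left right) := by
  unfold ringCoords
  rw [List.foldl_append, List.foldl_append, List.foldl_append,
      List.foldl_map, List.foldl_map, List.foldl_map, List.foldl_map,
      show tp + 1 - 1 = tp by ring]
  rfl

theorem loop_eq : ∀ (fuel : Nat) (m : List (List Int)) (tp btm left right : Int),
    0 ≤ tp → 0 ≤ left →
    rotLoopA fuel m tp btm left right = rotLoopB fuel m tp btm left right := by
  intro fuel
  induction fuel with
  | zero => intro m tp btm left right _ _; rfl
  | succ n ih =>
    intro m tp btm left right htp hleft
    rw [rotLoopA, rotLoopB]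
    by_cases hc : left < right ∧ tp < btm
    · rw [if_pos hc, if_pos hc]
      obtain ⟨h1, h2⟩ := hc
      simp only []
      rw [foldA_eq, step_eq m htp hleft h1 h2]
      exact ih _ _ _ _ _ (by omega) (by omega)
    · rw [if_neg hc, if_neg hc]

-- ===== VERDICT (by name: the statement is the Claim_ definition above) =====
theorem rot_mat_spec : Claim_equal_rot_mat := by
  intro mat _ _
  unfold Spec_rot_mat rot_mat rot_mat_alt
  split
  · rfl
  · exact congrArg some (loop_eq _ _ _ _ _ _ (by omega) (by omega))
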